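-- pv_equiv track=rewrite | github.com/Vishakha-Prasad/Groww-RAG-Chatbot | phase-1-data-acquisition/parser_utils.py | build_header_index
-- ===== SOURCE A (Python) =====
-- from typing import Iterable, List, Dict
--
-- def _normalize(s: str) -> str:
--     return s.strip().casefold()
--
-- def build_header_index(
--     lines: List[str],
--     header_aliases: Dict[str, Iterable[str]],
-- ) -> Dict[str, List[int]]:
--     """
--     Build an index of header -> list of line indices where it appears.
--
--     header_aliases:
--         logical_header_name -> list of possible textual variants.
--     """
--     index: Dict[str, List[int]] = {name: [] for name in header_aliases.keys()}
--     normalized_lines = [_normalize(l) for l in lines]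
--
--     for logical_name, aliases in header_aliases.items():
--         alias_norm = [_normalize(a) for a in aliases]
--         for i, line_norm in enumerate(normalized_lines):
--             if any(line_norm == a or line_norm.startswith(a) for a in alias_norm):
--                 index[logical_name].append(i)
--
--     return index
-- ===== SOURCE B (Python) =====
-- def build_header_index(lines, header_aliases):
--     # Different algorithm: build ONE dictionary mapping every normalized alias
--     # text to the logical header names that own it, then walk each line once and
--     # look up every prefix of its normalized form in that dictionary -- the
--     # per-line scan over all headers' alias lists disappears entirely.
--     alias_map = {}
--     for name, aliases in header_aliases.items():
--         for a in aliases: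
--             alias_map.setdefault(a.strip().casefold(), []).append(name)
--     index = {name: [] for name in header_aliases}
--     for i, line in enumerate(lines):
--         ln = line.strip().casefold()
--         seen = set()
--         for j in range(len(ln) + 1):
--             for name in alias_map.get(ln[:j], ()):
--                 if name not in seen:
--                     seen.add(name)
--                     index[name].append(i)
--     return index
-- ===== Notes on version B (the rewrite author's own statement) =====
-- stated objective: alternative
-- what changed: Instead of scanning every header's alias list for every line with startswith, B inverts the data: one dictionary keyed by normalized alias text (built once) maps each alias to its header names, and each line is matched by hashing every prefix of its normalized form into that dictionary, deduplicating per line with a set; the nested alias scan per (header, line) pair is gone.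
import Mathlib
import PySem

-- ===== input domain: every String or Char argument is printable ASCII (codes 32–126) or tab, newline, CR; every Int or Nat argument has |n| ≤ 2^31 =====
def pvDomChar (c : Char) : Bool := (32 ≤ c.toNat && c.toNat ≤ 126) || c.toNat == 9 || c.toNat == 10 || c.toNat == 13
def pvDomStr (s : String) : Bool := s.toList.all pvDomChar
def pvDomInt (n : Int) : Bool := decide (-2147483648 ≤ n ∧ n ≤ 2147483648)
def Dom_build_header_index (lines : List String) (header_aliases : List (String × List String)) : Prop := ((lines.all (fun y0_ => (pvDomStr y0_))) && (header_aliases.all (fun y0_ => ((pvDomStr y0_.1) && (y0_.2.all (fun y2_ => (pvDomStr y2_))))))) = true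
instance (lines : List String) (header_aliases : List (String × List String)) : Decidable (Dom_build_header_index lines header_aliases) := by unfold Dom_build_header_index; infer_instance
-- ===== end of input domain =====

-- B replaces the per-(header, line) alias scan by a dictionary keyed by
-- normalized alias text built once, looked up at every prefix of each
-- normalized line (a per-line set deduplicates); same results, proved equal.

-- _normalize(s) = s.strip().casefold(); casefold = lower on the ASCII strings of Dom (exact here)
def pvNorm (s : String) : String := PySem.Str.lower (PySem.Str.strip s)

-- ===== PORT A =====
def build_header_index (lines : List String) (header_aliases : List (String × List String)) : List (String × List Int) :=
  -- index = {name: [] for name in header_aliases.keys()}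
  let index : PySem.Dict String (List Int) :=
    header_aliases.foldl (fun d p => d.insert p.1 ([] : List Int)) PySem.Dict.empty
  let normalized_lines := lines.map pvNorm
  -- for logical_name, aliases in header_aliases.items(): for i, line_norm in enumerate(...):
  --   index[logical_name].append(i)   (key always present; ported as modify with default [])
  (header_aliases.foldl (fun d p =>
      let alias_norm := p.2.map pvNorm
      (PySem.List.enumerate normalized_lines).foldl
        (fun d q =>
          if alias_norm.any (fun a => q.2 == a || PySem.Str.startswith q.2 a)
          then d.modify p.1 [] (fun l => l ++ [q.1]) else d)
        d)
    index).items

-- ===== PORT B =====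
-- alias_map: for name, aliases: for a: alias_map.setdefault(_norm(a), []).append(name)
def pvAliasMap (header_aliases : List (String × List String)) : PySem.Dict String (List String) :=
  header_aliases.foldl
    (fun d p => p.2.foldl (fun d a => d.modify (pvNorm a) [] (fun l => l ++ [p.1])) d)
    PySem.Dict.empty

-- the body of 'for i, line in enumerate(lines)': seen = set(); for j in range(len(ln)+1):
--   for name in alias_map.get(ln[:j], ()): if name not in seen: seen.add(name); index[name].append(i)
def pvLineStep (alias_map : PySem.Dict String (List String)) (q : Int × String)
    (d : PySem.Dict String (List Int)) : PySem.Dict String (List Int) :=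
  let ln := pvNorm q.2
  ((PySem.List.pyRange 0 (PySem.Str.len ln + 1) 1).foldl
      (fun st j =>
        (alias_map.getD (PySem.Str.slice ln none (some j)) []).foldl
          (fun st name =>
            if PySem.Set.contains st.1 name then st
            else (PySem.Set.add st.1 name, st.2.modify name [] (fun l => l ++ [q.1])))
          st)
      ((PySem.Set.empty : PySem.Set String), d)).2

def build_header_index_alt (lines : List String) (header_aliases : List (String × List String)) : List (String × List Int) :=
  let alias_map := pvAliasMap header_aliases
  let index : PySem.Dict String (List Int) :=
    header_aliases.foldl (fun d p => d.insert p.1 ([] : List Int)) PySem.Dict.empty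
  ((PySem.List.enumerate lines).foldl (fun d q => pvLineStep alias_map q d) index).items

-- ===== PRECONDITION & SPEC =====
-- The header_aliases assoc list encodes a Python dict, which cannot hold duplicate keys:
-- Pre_ requires the logical names to be distinct (it excludes no input the Python A accepts).
def Pre_build_header_index (lines : List String) (header_aliases : List (String × List String)) : Prop :=
  (header_aliases.map Prod.fst).Nodup
instance (lines : List String) (header_aliases : List (String × List String)) : Decidable (Pre_build_header_index lines header_aliases) := by unfold Pre_build_header_index; infer_instance
def pvWitness_build_header_index : List String × (List (String × List String)) :=
  ([" Revenue:", "costs"], [("revenue", ["revenue"]), ("cost", ["costs", "expenses"])])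

def Spec_build_header_index (lines : List String) (header_aliases : List (String × List String)) (out : List (String × List Int)) : Prop := out = build_header_index_alt lines header_aliases
instance (lines : List String) (header_aliases : List (String × List String)) (out : List (String × List Int)) : Decidable (Spec_build_header_index lines header_aliases out) := by unfold Spec_build_header_index; infer_instance

-- ===== CLAIM (what is proved, stated in full; the proofs are below) =====
def Claim_equal_build_header_index : Prop := ∀ (lines : List String) (header_aliases : List (String × List String)), Dom_build_header_index lines header_aliases → Pre_build_header_index lines header_aliases → Spec_build_header_index lines header_aliases (build_header_index lines header_aliases)

-- ===== LEMMAS AND PROOFS =====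

-- the common match condition: some alias of p is a prefix of the normalized line s
def pvMatch (p : String × List String) (s : String) : Bool :=
  p.2.any (fun a => PySem.Str.startswith (pvNorm s) (pvNorm a))

-- equality is subsumed by startswith (s == a → s.startswith(a))
theorem pv_cond_eq (s a : String) :
    ((s == a) || PySem.Str.startswith s a) = PySem.Str.startswith s a := by
  cases h : s == a
  · simp
  · have hs : s = a := by simpa using h
    subst hs
    simp [PySem.Chars.startswith_iff]

-- the initializer loop: items of the fresh index
theorem pv_index_items (l : List (String × List String))
    (hnd : (l.map Prod.fst).Nodup) :
    (l.foldl (fun d p => d.insert p.1 ([] : List Int)) PySem.Dict.empty).items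
      = l.map (fun p => (p.1, ([] : List Int))) := by
  have := PySem.Dict.items_foldl_insert_fresh l Prod.fst (fun _ => ([] : List Int))
    PySem.Dict.empty (by intro a _; simp) hnd
  simpa using this

theorem pv_index_keys (l : List (String × List String))
    (hnd : (l.map Prod.fst).Nodup) :
    (l.foldl (fun d p => d.insert p.1 ([] : List Int)) PySem.Dict.empty).keys
      = l.map Prod.fst := by
  have h := pv_index_items l hnd
  simp only [PySem.Dict.keys, h, List.map_map]
  rfl

theorem pv_index_getD (l : List (String × List String))
    (hnd : (l.map Prod.fst).Nodup) (k : String) :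
    (l.foldl (fun d p => d.insert p.1 ([] : List Int)) PySem.Dict.empty).getD k []
      = [] := by
  set d := l.foldl (fun d p => d.insert p.1 ([] : List Int)) PySem.Dict.empty with hd
  by_cases hk : k ∈ d.keys
  · rw [hd, pv_index_keys l hnd] at hk
    obtain ⟨p, hp, hpk⟩ := List.mem_map.mp hk
    have hmem : (k, ([] : List Int)) ∈ d.items := by
      rw [hd, pv_index_items l hnd]
      exact List.mem_map.mpr ⟨p, hp, by simp [hpk]⟩
    exact PySem.Dict.getD_of_mem_items d hmem (by rw [hd, pv_index_keys l hnd]; exact hnd) []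
  · exact PySem.Dict.getD_of_not_contains d [] (by
      rw [PySem.Dict.contains_eq_decide_mem_keys]; simpa using hk)

-- keys are unchanged by a modify at a key already present
theorem pv_keys_modify_mem {ν : Type} (d : PySem.Dict String ν) (k : String)
    (d0 : ν) (f : ν → ν) (hk : k ∈ d.keys) : (d.modify k d0 f).keys = d.keys := by
  rw [PySem.Dict.keys_modify]
  exact PySem.Dict.keys_insert_of_contains d _
    (by rw [PySem.Dict.contains_eq_decide_mem_keys]; simpa using hk)

theorem pv_innerA_keys (L : List (Int × String)) (c : Int × String → Bool)
    (k : String) :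
    ∀ d : PySem.Dict String (List Int), k ∈ d.keys →
    (L.foldl (fun d q => if c q then d.modify k [] (fun l => l ++ [q.1]) else d) d).keys
      = d.keys := by
  induction L with
  | nil => intro d _; rfl
  | cons q L ih =>
      intro d hk
      by_cases hc : c q
      · have hkeys := pv_keys_modify_mem d k [] (fun l => l ++ [q.1]) hk
        simp only [List.foldl_cons, hc, if_true]
        rw [ih _ (by rw [hkeys]; exact hk), hkeys]
      · simp only [List.foldl_cons, hc]
        exact ih d hk

theorem pv_outerA_keys (has : List (String × List String)) (E : List (Int × String))
    (cond : String × List String → Int × String → Bool) :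
    ∀ d : PySem.Dict String (List Int), (∀ p ∈ has, p.1 ∈ d.keys) →
    (has.foldl (fun d p =>
        E.foldl (fun d q => if cond p q then d.modify p.1 [] (fun l => l ++ [q.1]) else d) d)
      d).keys = d.keys := by
  induction has with
  | nil => intro d _; rfl
  | cons p has ih =>
      intro d hk
      simp only [List.foldl_cons]
      have h1 := pv_innerA_keys E (cond p) p.1 d (hk p (by simp))
      rw [ih _ (by intro x hx; rw [h1]; exact hk x (by simp [hx])), h1]

-- value of the A-side inner loop
theorem pv_innerA_getD (L : List (Int × String)) (c : Int × String → Bool)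
    (k k' : String) :
    ∀ d : PySem.Dict String (List Int),
    (L.foldl (fun d q => if c q then d.modify k [] (fun l => l ++ [q.1]) else d) d).getD k' []
      = d.getD k' [] ++ (if k' = k then (L.filter c).map Prod.fst else []) := by
  induction L with
  | nil => intro d; simp
  | cons q L ih =>
      intro d
      simp only [List.foldl_cons, List.filter_cons]
      by_cases hc : c q
      · simp only [hc, if_true, ih]
        rw [PySem.Dict.getD_modify]
        by_cases hk : k' = k <;> simp [hk]
      · simp [hc, ih]

-- value of the A-side outer loop
theorem pv_outerA_getD (has : List (String × List String)) (E : List (Int × String))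
    (cond : String × List String → Int × String → Bool) (k : String) :
    ∀ d : PySem.Dict String (List Int),
    (has.foldl (fun d p =>
        E.foldl (fun d q => if cond p q then d.modify p.1 [] (fun l => l ++ [q.1]) else d) d)
      d).getD k []
      = d.getD k [] ++ (has.filter (fun p => p.1 == k)).flatMap
          (fun p => (E.filter (cond p)).map Prod.fst) := by
  induction has with
  | nil => intro d; simp
  | cons p has ih =>
      intro d
      simp only [List.foldl_cons, List.filter_cons]
      rw [ih, pv_innerA_getD]
      by_cases hk : p.1 = k
      · have hbe : (p.1 == k) = true := by simpa using hk
        simp [hk, List.append_assoc]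
      · have hbe : (p.1 == k) = false := by simpa using hk
        have hk' : ¬ (k = p.1) := fun h => hk h.symm
        simp [hbe, hk']

-- with distinct first components, filtering by a member's key yields exactly it
theorem pv_filter_key_nodup {β : Type} (l : List (String × β)) (p : String × β)
    (hnd : (l.map Prod.fst).Nodup) (hp : p ∈ l) :
    l.filter (fun x => x.1 == p.1) = [p] := by
  induction l with
  | nil => cases hp
  | cons x l ih =>
      simp only [List.map_cons, List.nodup_cons] at hnd
      rcases List.mem_cons.mp hp with h | h
      · subst h
        have hnil : l.filter (fun x => x.1 == p.1) = [] := by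
          apply List.filter_eq_nil_iff.mpr
          intro y hy hbe
          exact hnd.1 (List.mem_map.mpr ⟨y, hy, by simpa using hbe.symm⟩)
        simp [hnil]
      · have hne : (x.1 == p.1) = false := by
          by_contra hcon
          have hx : x.1 = p.1 := by simpa using (Bool.not_eq_false _).mp hcon
          exact hnd.1 (List.mem_map.mpr ⟨p, h, hx.symm⟩)
        simp [hne, ih hnd.2 h]

-- members with the same key coincide when the keys are distinct
theorem pv_eq_of_fst_eq {β : Type} (l : List (String × β)) (x p : String × β)
    (hnd : (l.map Prod.fst).Nodup) (hx : x ∈ l) (hp : p ∈ l) (h : x.1 = p.1) : x = p := by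
  have hfx : x ∈ l.filter (fun y => y.1 == p.1) :=
    List.mem_filter.mpr ⟨hx, by simpa using h⟩
  rw [pv_filter_key_nodup l p hnd hp] at hfx
  simpa using hfx

theorem pv_enumerate_map {α β : Type} (f : α → β) (xs : List α) :
    ∀ s : Int, PySem.List.enumerate (xs.map f) s
      = (PySem.List.enumerate xs s).map (fun q => (q.1, f q.2)) := by
  induction xs with
  | nil => intro s; rfl
  | cons x xs ih =>
      intro s
      simp [PySem.List.enumerate_cons, ih]

-- ===== B-side lemmas =====

-- the alias_map build, inner loop over one header's aliases
theorem pv_amap_inner_getD (as : List String) (nm s : String) :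
    ∀ d : PySem.Dict String (List String),
    (as.foldl (fun d a => d.modify (pvNorm a) [] (fun l => l ++ [nm])) d).getD s []
      = d.getD s [] ++ (as.filter (fun a => pvNorm a == s)).map (fun _ => nm) := by
  induction as with
  | nil => intro d; simp
  | cons a as ih =>
      intro d
      simp only [List.foldl_cons, List.filter_cons]
      rw [ih, PySem.Dict.getD_modify]
      by_cases h : s = pvNorm a
      · have hbe : (pvNorm a == s) = true := by simpa using h.symm
        simp [h, List.append_assoc]
      · have hbe : (pvNorm a == s) = false := by
          simpa using fun hh => h hh.symm
        simp [h, hbe]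

theorem pv_amap_getD (has : List (String × List String)) (s : String) :
    ∀ d : PySem.Dict String (List String),
    (has.foldl (fun d p =>
        p.2.foldl (fun d a => d.modify (pvNorm a) [] (fun l => l ++ [p.1])) d) d).getD s []
      = d.getD s [] ++ has.flatMap
          (fun p => (p.2.filter (fun a => pvNorm a == s)).map (fun _ => p.1)) := by
  induction has with
  | nil => intro d; simp
  | cons p has ih =>
      intro d
      simp only [List.foldl_cons, List.flatMap_cons]
      rw [ih, pv_amap_inner_getD]
      simp [List.append_assoc]

-- membership in an alias_map entry
theorem pv_mem_amap (has : List (String × List String)) (s k : String) :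
    k ∈ (pvAliasMap has).getD s [] ↔ ∃ p ∈ has, p.1 = k ∧ ∃ a ∈ p.2, pvNorm a = s := by
  unfold pvAliasMap
  rw [pv_amap_getD, PySem.Dict.getD_empty]
  simp only [List.nil_append, List.mem_flatMap, List.mem_map, List.mem_filter]
  constructor
  · rintro ⟨p, hp, a, ⟨ha, hbe⟩, hk⟩
    exact ⟨p, hp, hk.symm ▸ rfl, a, ha, by simpa using hbe⟩
  · rintro ⟨p, hp, hk, a, ha, hn⟩
    exact ⟨p, hp, a, ⟨ha, by simpa using hn⟩, hk⟩

-- startswith as "equals some prefix slice"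
theorem pv_startswith_iff_prefix (ln a : String) :
    PySem.Str.startswith ln a = true ↔
      ∃ j ∈ PySem.List.pyRange 0 (PySem.Str.len ln + 1) 1,
        PySem.Str.slice ln none (some j) = a := by
  rw [PySem.Str.startswith_eq, PySem.Chars.startswith_iff]
  constructor
  · intro h
    refine ⟨(a.toList.length : Int), ?_, ?_⟩
    · rw [PySem.List.mem_pyRange_one, PySem.Str.len_eq]
      have := List.IsPrefix.length_le h
      omega
    · rw [← String.toList_inj]
      have : (PySem.Str.slice ln none (some (a.toList.length : Int))).toList
          = PySem.List.slice ln.toList none (some (a.toList.length : Int)) := by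
        simp [PySem.Str.slice]
      rw [this, PySem.List.slice_to _ (by positivity)]
      simp only [Int.toNat_natCast]
      exact (List.prefix_iff_eq_take.mp h).symm
  · rintro ⟨j, hj, hs⟩
    rw [PySem.List.mem_pyRange_one] at hj
    rw [← String.toList_inj] at hs
    have hsl : (PySem.Str.slice ln none (some j)).toList
        = PySem.List.slice ln.toList none (some j) := by
      simp [PySem.Str.slice]
    rw [hsl, PySem.List.slice_to _ hj.1] at hs
    rw [← hs]
    exact List.take_prefix _ _

-- a nested fold over (j, then the names at that prefix) is a fold over the flattened list
theorem pv_foldl_nested {α β σ : Type} (l : List α) (f : α → List β) (g : σ → β → σ) :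
    ∀ s : σ, l.foldl (fun s x => (f x).foldl g s) s = (l.flatMap f).foldl g s := by
  induction l with
  | nil => intro s; rfl
  | cons x l ih =>
      intro s
      simp only [List.foldl_cons, List.flatMap_cons, List.foldl_append]
      exact ih _

-- the seen/append loop over a flat list of names: effect on one key
theorem pv_names_getD (i : Int) (ns : List String) (k : String) :
    ∀ (seen : PySem.Set String) (d : PySem.Dict String (List Int)),
    ((ns.foldl (fun st name =>
        if PySem.Set.contains st.1 name then st
        else (st.1.add name, st.2.modify name [] (fun l => l ++ [i]))) (seen, d)).2).getD k []
      = d.getD k [] ++ (if k ∈ ns ∧ k ∉ seen then [i] else []) := by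
  induction ns with
  | nil => intro seen d; simp
  | cons n ns ih =>
      intro seen d
      simp only [List.foldl_cons]
      by_cases hc : PySem.Set.contains seen n
      · have hn : n ∈ seen := by simpa [PySem.Set.contains] using hc
        rw [if_pos hc, ih]
        by_cases hk : k = n
        · subst hk; simp [hn]
        · simp only [List.mem_cons]
          by_cases hks : k ∈ seen <;> simp [hk, hks]
      · have hn : n ∉ seen := by simpa [PySem.Set.contains] using hc
        rw [if_neg hc, ih]
        rw [PySem.Dict.getD_modify]
        by_cases hk : k = n
        · subst hk
          simp [hn]
        · have hmem : k ∈ PySem.Set.add seen n ↔ k ∈ seen := by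
            rw [PySem.Set.mem_add]; simp [hk]
          simp only [List.mem_cons, hk, false_or]
          by_cases hks : k ∈ seen <;> simp [hmem, hks]

-- the same loop preserves the key list when every name is already a key
theorem pv_names_keys (i : Int) (ns : List String) :
    ∀ (seen : PySem.Set String) (d : PySem.Dict String (List Int)),
    (∀ n ∈ ns, n ∈ d.keys) →
    ((ns.foldl (fun st name =>
        if PySem.Set.contains st.1 name then st
        else (st.1.add name, st.2.modify name [] (fun l => l ++ [i]))) (seen, d)).2).keys
      = d.keys := by
  induction ns with
  | nil => intro seen d _; rfl
  | cons n ns ih =>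
      intro seen d hkeys
      simp only [List.foldl_cons]
      by_cases hc : PySem.Set.contains seen n
      · rw [if_pos hc]
        exact ih _ _ (fun x hx => hkeys x (by simp [hx]))
      · rw [if_neg hc]
        have hkm := pv_keys_modify_mem d n [] (fun l => l ++ [i]) (hkeys n (by simp))
        rw [ih _ _ (by intro x hx; rw [hkm]; exact hkeys x (by simp [hx])), hkm]

-- the flattened per-line name list
def pvLineNames (amap : PySem.Dict String (List String)) (line : String) : List String :=
  (PySem.List.pyRange 0 (PySem.Str.len (pvNorm line) + 1) 1).flatMap
    (fun j => amap.getD (PySem.Str.slice (pvNorm line) none (some j)) [])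

theorem pv_lineStep_eq (amap : PySem.Dict String (List String)) (q : Int × String)
    (d : PySem.Dict String (List Int)) :
    pvLineStep amap q d
      = ((pvLineNames amap q.2).foldl (fun st name =>
          if PySem.Set.contains st.1 name then st
          else (st.1.add name, st.2.modify name [] (fun l => l ++ [q.1])))
          ((PySem.Set.empty : PySem.Set String), d)).2 := by
  unfold pvLineStep pvLineNames
  dsimp only []
  rw [pv_foldl_nested]

-- the matched names of a line are exactly the headers with a prefix alias
theorem pv_mem_lineNames (has : List (String × List String)) (line k : String) :
    k ∈ pvLineNames (pvAliasMap has) line ↔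
      ∃ p ∈ has, p.1 = k ∧ pvMatch p line = true := by
  unfold pvLineNames
  simp only [List.mem_flatMap]
  constructor
  · rintro ⟨j, hj, hk⟩
    obtain ⟨p, hp, hpk, a, ha, hn⟩ := (pv_mem_amap has _ k).mp hk
    refine ⟨p, hp, hpk, ?_⟩
    unfold pvMatch
    rw [List.any_eq_true]
    exact ⟨a, ha, (pv_startswith_iff_prefix (pvNorm line) (pvNorm a)).mpr ⟨j, hj, hn.symm⟩⟩
  · rintro ⟨p, hp, hpk, hm⟩
    unfold pvMatch at hm
    rw [List.any_eq_true] at hm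
    obtain ⟨a, ha, hsw⟩ := hm
    obtain ⟨j, hj, hs⟩ := (pv_startswith_iff_prefix (pvNorm line) (pvNorm a)).mp hsw
    exact ⟨j, hj, (pv_mem_amap has _ k).mpr ⟨p, hp, hpk, a, ha, hs.symm⟩⟩

-- outer loop over the enumerated lines: effect on one key
theorem pv_outerB_getD (amap : PySem.Dict String (List String))
    (E : List (Int × String)) (c : String → String → Bool)
    (hc : ∀ line k, (k ∈ pvLineNames amap line) ↔ c k line = true) (k : String) :
    ∀ d : PySem.Dict String (List Int),
    (E.foldl (fun d q => pvLineStep amap q d) d).getD k []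
      = d.getD k [] ++ (E.filter (fun q => c k q.2)).map Prod.fst := by
  induction E with
  | nil => intro d; simp
  | cons q E ih =>
      intro d
      simp only [List.foldl_cons, List.filter_cons]
      rw [ih, pv_lineStep_eq, pv_names_getD]
      by_cases hm : c k q.2
      · have : k ∈ pvLineNames amap q.2 := (hc q.2 k).mpr hm
        simp [hm, this, PySem.Set.empty, List.append_assoc]
      · have : k ∉ pvLineNames amap q.2 := fun h => hm ((hc q.2 k).mp h)
        simp [hm, this]

-- outer loop preserves the key list
theorem pv_outerB_keys (has : List (String × List String)) (E : List (Int × String)) :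
    ∀ d : PySem.Dict String (List Int), (∀ p ∈ has, p.1 ∈ d.keys) →
    (E.foldl (fun d q => pvLineStep (pvAliasMap has) q d) d).keys = d.keys := by
  induction E with
  | nil => intro d _; rfl
  | cons q E ih =>
      intro d hk
      simp only [List.foldl_cons]
      have h1 : (pvLineStep (pvAliasMap has) q d).keys = d.keys := by
        rw [pv_lineStep_eq]
        apply pv_names_keys
        intro n hn
        obtain ⟨p, hp, hpk, _⟩ := (pv_mem_lineNames has q.2 n).mp hn
        exact hpk ▸ hk p hp
      rw [ih _ (by intro x hx; rw [h1]; exact hk x hx), h1]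

-- with distinct keys, the any-over-headers condition at key p.1 is p's own match
theorem pv_cond_at_key (has : List (String × List String)) (p : String × List String)
    (hnd : (has.map Prod.fst).Nodup) (hp : p ∈ has) (line : String) :
    (has.any (fun x => x.1 == p.1 && pvMatch x line)) = pvMatch p line := by
  by_cases hm : pvMatch p line
  · rw [hm, List.any_eq_true.mpr ⟨p, hp, by simp [hm]⟩]
  · rw [Bool.eq_false_iff.mpr hm]
    rw [List.any_eq_false]
    intro x hx
    by_cases hxk : x.1 = p.1
    · have : x = p := pv_eq_of_fst_eq has x p hnd hx hp hxk
      subst this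
      simp [Bool.eq_false_iff.mpr hm]
    · simp [hxk]

-- ===== VERDICT (by name: the statement is the Claim_ definition above) =====
theorem build_header_index_spec : Claim_equal_build_header_index := by
  intro lines header_aliases _ hpre
  unfold Spec_build_header_index build_header_index build_header_index_alt
  unfold Pre_build_header_index at hpre
  set condA := fun (p : String × List String) (q : Int × String) =>
    (p.2.map pvNorm).any (fun a => q.2 == a || PySem.Str.startswith q.2 a) with hcA
  set index0 := header_aliases.foldl (fun d p => d.insert p.1 ([] : List Int)) PySem.Dict.empty with hi0
  set FA := header_aliases.foldl (fun d p =>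
      (PySem.List.enumerate (lines.map pvNorm)).foldl
        (fun d q => if condA p q then d.modify p.1 [] (fun l => l ++ [q.1]) else d) d)
    index0 with hFA
  set FB := (PySem.List.enumerate lines).foldl
      (fun d q => pvLineStep (pvAliasMap header_aliases) q d) index0 with hFB
  have hi0keys : index0.keys = header_aliases.map Prod.fst := by
    rw [hi0]; exact pv_index_keys _ hpre
  have hkA : FA.keys = header_aliases.map Prod.fst := by
    rw [hFA, pv_outerA_keys _ _ _ _ (by
      intro p hp; rw [hi0keys]; exact List.mem_map.mpr ⟨p, hp, rfl⟩), hi0keys]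
  have hkB : FB.keys = header_aliases.map Prod.fst := by
    rw [hFB, pv_outerB_keys _ _ _ (by
      intro p hp; rw [hi0keys]; exact List.mem_map.mpr ⟨p, hp, rfl⟩), hi0keys]
  -- the Bool condition used on the B side
  set condC := fun (k : String) (line : String) =>
    header_aliases.any (fun x => x.1 == k && pvMatch x line) with hcC
  have hcc : ∀ line k, (k ∈ pvLineNames (pvAliasMap header_aliases) line) ↔ condC k line = true := by
    intro line k
    rw [pv_mem_lineNames, hcC]
    simp only [List.any_eq_true, Bool.and_eq_true, beq_iff_eq]
  -- per-key values agree for every header key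
  have hval : ∀ p ∈ header_aliases, FA.getD p.1 [] = FB.getD p.1 [] := by
    intro p hp
    rw [hFA, pv_outerA_getD, hi0, pv_index_getD _ hpre,
        pv_filter_key_nodup header_aliases p hpre hp]
    rw [hFB, pv_outerB_getD (pvAliasMap header_aliases) _ condC hcc, hi0,
        pv_index_getD _ hpre]
    simp only [List.nil_append, List.flatMap_cons, List.flatMap_nil, List.append_nil]
    have hfilt : (PySem.List.enumerate lines 0).filter (fun q => condC p.1 q.2)
        = (PySem.List.enumerate lines 0).filter (fun q => pvMatch p q.2) := by
      apply List.filter_congr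
      intro q _
      rw [hcC]
      exact pv_cond_at_key header_aliases p hpre hp q.2
    rw [hfilt, pv_enumerate_map pvNorm lines 0, List.filter_map, List.map_map]
    have hcond : (condA p ∘ fun q : Int × String => (q.1, pvNorm q.2))
        = fun q : Int × String => pvMatch p q.2 := by
      funext q
      simp only [Function.comp, hcA, pvMatch, List.any_map]
      exact List.any_congr rfl (fun a => by
        simp only [Function.comp]
        exact pv_cond_eq (pvNorm q.2) (pvNorm a))
    rw [hcond]
    rfl
  have hndkA : FA.keys.Nodup := by rw [hkA]; exact hpre
  have hndkB : FB.keys.Nodup := by rw [hkB]; exact hpre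
  rw [PySem.Dict.items_eq_map_keys FA hndkA [], PySem.Dict.items_eq_map_keys FB hndkB [],
      hkA, hkB]
  apply List.map_congr_left
  intro k hk
  obtain ⟨p, hp, hpk⟩ := List.mem_map.mp hk
  rw [← hpk, hval p hp]
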